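-- pv_equiv track=rewrite | github.com/guisaliba/kebab | scripts/eval/main.py | _canonical_vs_source_note_ok
-- ===== SOURCE A (Python) =====
-- from typing import Any
--
-- def _canonical_vs_source_note_ok(case: dict[str, Any], result: dict[str, Any]) -> bool:
--     if not case.get("expect_canonical_over_source_note", False):
--         return True
--     paths = result["wiki_paths"]
--     canonical_index = None
--     source_note_index = None
--     for idx, path in enumerate(paths):
--         if "/source-notes/" in path:
--             source_note_index = idx if source_note_index is None else source_note_index
--         else:
--             canonical_index = idx if canonical_index is None else canonical_index
--     if source_note_index is None:
--         return True
--     if canonical_index is None: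
--         return False
--     return canonical_index < source_note_index
-- ===== SOURCE B (Python) =====
-- def _canonical_vs_source_note_ok(case, result):
--     if not case.get("expect_canonical_over_source_note", False):
--         return True
--     paths = result["wiki_paths"]
--     if not any("/source-notes/" in p for p in paths):
--         return True
--     return "/source-notes/" not in paths[0]
-- ===== Notes on version B (the rewrite author's own statement) =====
-- stated objective: simpler
-- what changed: Replaces the two-index tracking loop by the observation that the answer only depends on whether any source-note path exists and whether the first path is canonical: B is an existence check plus a first-element test.
import Mathlib
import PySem

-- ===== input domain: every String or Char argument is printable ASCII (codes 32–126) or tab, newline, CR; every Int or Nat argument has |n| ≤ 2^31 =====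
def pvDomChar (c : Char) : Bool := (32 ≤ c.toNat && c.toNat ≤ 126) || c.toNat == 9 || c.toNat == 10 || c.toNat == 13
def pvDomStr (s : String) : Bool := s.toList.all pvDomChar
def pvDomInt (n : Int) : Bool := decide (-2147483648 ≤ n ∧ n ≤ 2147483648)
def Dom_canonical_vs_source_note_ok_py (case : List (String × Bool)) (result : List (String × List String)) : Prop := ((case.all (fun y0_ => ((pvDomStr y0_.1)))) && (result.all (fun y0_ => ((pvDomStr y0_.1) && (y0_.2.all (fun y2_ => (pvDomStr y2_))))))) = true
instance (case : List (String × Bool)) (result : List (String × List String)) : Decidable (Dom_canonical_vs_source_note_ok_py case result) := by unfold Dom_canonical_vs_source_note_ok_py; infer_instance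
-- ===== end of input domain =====

-- B replaces A's two-index tracking loop by an existence check plus a first-element test (simpler, same O(n)).

-- ===== PORT A =====
def canonical_vs_source_note_ok_py (case : List (String × Bool)) (result : List (String × List String)) : Bool :=
  if !(((case.lookup "expect_canonical_over_source_note").getD false)) then true
  else
    -- result["wiki_paths"]: Pre_ guarantees the key is present; `.getD []` is never the fallback there
    let paths := ((result.lookup "wiki_paths")).getD []
    let st := (PySem.List.enumerate paths 0).foldl
      (fun (st : Option Int × Option Int) ip =>
        if PySem.Str.isIn "/source-notes/" ip.2 then
          (st.1, if st.2.isNone then some ip.1 else st.2)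
        else
          (if st.1.isNone then some ip.1 else st.1, st.2))
      (none, none)
    match st.2 with
    | none => true
    | some sni =>
      match st.1 with
      | none => false
      | some ci => decide (ci < sni)

-- ===== PORT B =====
def canonical_vs_source_note_ok_py_alt (case : List (String × Bool)) (result : List (String × List String)) : Bool :=
  if !(((case.lookup "expect_canonical_over_source_note").getD false)) then true
  else
    let paths := ((result.lookup "wiki_paths")).getD []
    if !(paths.any (fun p => PySem.Str.isIn "/source-notes/" p)) then true
    else
      match paths with
      | [] => true  -- unreachable: a source-note path exists, so paths ≠ []
      | p :: _ => !(PySem.Str.isIn "/source-notes/" p)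

-- ===== PRECONDITION & SPEC =====
-- Pre_ excludes exactly the inputs where Python raises KeyError: the flag is set but result has no "wiki_paths" key.
def Pre_canonical_vs_source_note_ok_py (case : List (String × Bool)) (result : List (String × List String)) : Prop :=
  ((case.lookup "expect_canonical_over_source_note").getD false) = true →
    (result.lookup "wiki_paths").isSome = true
instance (case : List (String × Bool)) (result : List (String × List String)) : Decidable (Pre_canonical_vs_source_note_ok_py case result) := by unfold Pre_canonical_vs_source_note_ok_py; infer_instance

def pvWitness_canonical_vs_source_note_ok_py : (List (String × Bool)) × (List (String × List String)) :=
  ([("expect_canonical_over_source_note", true)], [("wiki_paths", ["/wiki/a", "/source-notes/a"])])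

def Spec_canonical_vs_source_note_ok_py (case : List (String × Bool)) (result : List (String × List String)) (out : Bool) : Prop := out = canonical_vs_source_note_ok_py_alt case result
instance (case : List (String × Bool)) (result : List (String × List String)) (out : Bool) : Decidable (Spec_canonical_vs_source_note_ok_py case result out) := by unfold Spec_canonical_vs_source_note_ok_py; infer_instance

-- ===== CLAIM (what is proved, stated in full; the proofs are below) =====
def Claim_equal_canonical_vs_source_note_ok_py : Prop := ∀ (case : List (String × Bool)) (result : List (String × List String)), Dom_canonical_vs_source_note_ok_py case result → Pre_canonical_vs_source_note_ok_py case result → Spec_canonical_vs_source_note_ok_py case result (canonical_vs_source_note_ok_py case result)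

-- ===== LEMMAS AND PROOFS =====

-- proof-side helper: Python's 'x if acc is None else acc' accumulator update
def orD (a x : Option Int) : Option Int := match a with | none => x | some v => some v

-- first index (counting from s) of an element satisfying f
def firstIdx (f : String → Bool) : List String → Int → Option Int
  | [], _ => none
  | p :: ps, s => if f p then some s else firstIdx f ps (s + 1)

theorem firstIdx_ge (f : String → Bool) (l : List String) (s c : Int)
    (h : firstIdx f l s = some c) : s ≤ c := by
  induction l generalizing s with
  | nil => simp [firstIdx] at h
  | cons p ps ih =>
    simp only [firstIdx] at h
    split at h
    · cases h; exact le_refl _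
    · have := ih (s + 1) h; omega

theorem firstIdx_none_iff (f : String → Bool) (l : List String) (s : Int) :
    firstIdx f l s = none ↔ l.any f = false := by
  induction l generalizing s with
  | nil => simp [firstIdx]
  | cons p ps ih =>
    simp only [firstIdx, List.any_cons]
    split
    · simp_all
    · simp_all [ih (s + 1)]

theorem orD_none (x : Option Int) : orD none x = x := rfl

theorem foldl_enum_eq (f : String → Bool) (l : List String) (s : Int)
    (a b : Option Int) :
    (PySem.List.enumerate l s).foldl
      (fun (st : Option Int × Option Int) ip =>
        if f ip.2 then (st.1, if st.2.isNone then some ip.1 else st.2)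
        else ((if st.1.isNone then some ip.1 else st.1), st.2)) (a, b)
    = (orD a (firstIdx (fun p => !f p) l s), orD b (firstIdx f l s)) := by
  induction l generalizing s a b with
  | nil => cases a <;> cases b <;> simp [PySem.List.enumerate_nil, firstIdx, orD]
  | cons p ps ih =>
    rw [PySem.List.enumerate_cons, List.foldl_cons]
    by_cases hf : f p
    · cases b with
      | none =>
        simp only [hf, if_true, Option.isNone_none]
        rw [ih]
        simp [firstIdx, hf, orD]
      | some v =>
        simp only [hf, if_true, Option.isNone_some, Bool.false_eq_true, ite_false]
        rw [ih]
        simp [firstIdx, hf, orD]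
    · cases a with
      | none =>
        simp only [hf, Bool.false_eq_true, if_false, Option.isNone_none, ite_true]
        rw [ih]
        simp [firstIdx, hf, orD]
      | some v =>
        simp only [hf, Bool.false_eq_true, if_false, Option.isNone_some]
        rw [ih]
        simp [firstIdx, hf, orD]

theorem inner_eq (paths : List String) :
    (match ((PySem.List.enumerate paths 0).foldl
      (fun (st : Option Int × Option Int) ip =>
        if PySem.Str.isIn "/source-notes/" ip.2 then
          (st.1, if st.2.isNone then some ip.1 else st.2)
        else
          ((if st.1.isNone then some ip.1 else st.1), st.2)) (none, none)).2 with
    | none => true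
    | some sni =>
      match ((PySem.List.enumerate paths 0).foldl
      (fun (st : Option Int × Option Int) ip =>
        if PySem.Str.isIn "/source-notes/" ip.2 then
          (st.1, if st.2.isNone then some ip.1 else st.2)
        else
          ((if st.1.isNone then some ip.1 else st.1), st.2)) (none, none)).1 with
      | none => false
      | some ci => decide (ci < sni))
    = (if !(paths.any (fun p => PySem.Str.isIn "/source-notes/" p)) then true
       else
         match paths with
         | [] => true
         | p :: _ => !(PySem.Str.isIn "/source-notes/" p)) := by
  rw [foldl_enum_eq (fun p => PySem.Str.isIn "/source-notes/" p) paths 0 none none]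
  rw [orD_none, orD_none]
  cases paths with
  | nil => simp [firstIdx]
  | cons p ps =>
    by_cases hf : PySem.Str.isIn "/source-notes/" p
    · -- first path is a source-note path: A compares c < 0 (false) or has no canonical (false); B returns false
      simp only [firstIdx, hf, if_true, Bool.not_true, Bool.false_eq_true, if_false,
        List.any_cons, Bool.true_or, zero_add]
      cases hc : firstIdx (fun q => !PySem.Str.isIn "/source-notes/" q) ps 1 with
      | none => rfl
      | some c =>
        have hge := firstIdx_ge _ _ _ _ hc
        simp only [decide_eq_false_iff_not]
        omega
    · -- first path is canonical: A's canonical index is 0 < any source index; B returns true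
      simp only [Bool.not_eq_true] at hf
      simp only [firstIdx, hf, Bool.false_eq_true, if_false, Bool.not_false, if_true,
        List.any_cons, Bool.false_or, zero_add]
      cases hs : firstIdx (fun q => PySem.Str.isIn "/source-notes/" q) ps 1 with
      | none =>
        have hany := (firstIdx_none_iff (fun q => PySem.Str.isIn "/source-notes/" q) ps 1).mp hs
        simp
      | some c =>
        have hge := firstIdx_ge _ _ _ _ hs
        have h0c : (0 : Int) < c := by omega
        simp [h0c]

-- ===== VERDICT (by name: the statement is the Claim_ definition above) =====
theorem canonical_vs_source_note_ok_py_spec : Claim_equal_canonical_vs_source_note_ok_py := by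
  intro case result _ _
  unfold Spec_canonical_vs_source_note_ok_py canonical_vs_source_note_ok_py canonical_vs_source_note_ok_py_alt
  by_cases hflag : ((case.lookup "expect_canonical_over_source_note").getD false)
  · simp only [hflag, Bool.not_true, if_false, Bool.false_eq_true]
    exact inner_eq _
  · simp [hflag]
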